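-- pv_equiv track=rewrite | github.com/KJH0406/Algorithm | 백준/Silver/1652. 누울 자리를 찾아라/누울 자리를 찾아라.py | lay_down
-- ===== SOURCE A (Python) =====
-- def lay_down(li, N):
--     count_li = []
--     for item in li:
--         count = 0
--         for i in range(N):
--             if item[i] == '.':
--                 count += 1
--             else:
--                 count_li.append(count)
--                 count = 0
--         count_li.append(count)
--     return count_li
-- ===== SOURCE B (Python) =====
-- def lay_down(li, N):
--     count_li = []
--     n = max(N, 0)
--     for item in li:
--         seg = item[:n]
--         obs = [i for i, c in enumerate(seg) if c != '.']
--         bounds = [-1] + obs + [len(seg)]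
--         count_li += [b - a - 1 for a, b in zip(bounds, bounds[1:])]
--     return count_li
-- ===== Notes on version B (the rewrite author's own statement) =====
-- stated objective: alternative
-- what changed: B replaces A's incremental run counter (flush-on-obstacle) with a positional method: per row it collects obstacle indices and emits gaps between consecutive boundaries (-1, obstacles, row end) as differences.
import Mathlib
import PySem

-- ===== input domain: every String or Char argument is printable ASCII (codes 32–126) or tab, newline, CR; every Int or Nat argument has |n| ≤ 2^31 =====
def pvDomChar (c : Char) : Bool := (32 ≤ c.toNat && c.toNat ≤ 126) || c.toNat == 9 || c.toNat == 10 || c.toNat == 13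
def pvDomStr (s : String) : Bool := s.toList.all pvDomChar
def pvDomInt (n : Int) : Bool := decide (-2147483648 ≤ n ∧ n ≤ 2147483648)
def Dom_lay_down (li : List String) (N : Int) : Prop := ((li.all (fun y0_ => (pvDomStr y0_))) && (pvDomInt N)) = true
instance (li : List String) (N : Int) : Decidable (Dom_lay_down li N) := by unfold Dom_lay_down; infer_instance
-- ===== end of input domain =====

-- B replaces A's incremental run counting with obstacle positions + gap differences (alternative algorithm, same cost);
-- on rows shorter than N (with 0 < N) A raises IndexError, so those inputs are excluded by Pre_.


-- ===== PORT A =====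
-- one step of A's inner loop: '.' increments the run, anything else flushes it
def layStep (p : List Int × Int) (c : Char) : List Int × Int :=
  if c = '.' then (p.1, p.2 + 1) else (p.1 ++ [p.2], 0)

def lay_down (li : List String) (N : Int) : List Int :=
  li.foldl (fun count_li item =>
    let q := (PySem.List.pyRange 0 N 1).foldl (fun (p : List Int × Int) i =>
      match PySem.Str.pyGet? item i with   -- none = IndexError, excluded by Pre_
      | some c => layStep p c
      | none => p) (count_li, 0)
    q.1 ++ [q.2]) []

-- ===== PORT B =====
def lay_down_alt (li : List String) (N : Int) : List Int :=
  li.foldl (fun count_li item =>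
    let seg := PySem.List.slice item.toList none (some (max N 0))   -- item[:n]
    let obs := ((PySem.List.enumerate seg 0).filter (fun p => p.2 != '.')).map (·.1)
    let bounds := (-1 : Int) :: obs ++ [(seg.length : Int)]
    count_li ++ (bounds.zip bounds.tail).map (fun p => p.2 - p.1 - 1)) []

-- ===== PRECONDITION & SPEC =====
-- Pre_ excludes exactly the inputs where A raises IndexError: 0 < N with some row shorter than N.
def Pre_lay_down (li : List String) (N : Int) : Prop := N ≤ 0 ∨ ∀ s ∈ li, N ≤ (s.length : Int)
instance (li : List String) (N : Int) : Decidable (Pre_lay_down li N) := by unfold Pre_lay_down; infer_instance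
def pvWitness_lay_down : List String × Int := (["..x.", "x..."], 4)

def Spec_lay_down (li : List String) (N : Int) (out : List Int) : Prop := out = lay_down_alt li N
instance (li : List String) (N : Int) (out : List Int) : Decidable (Spec_lay_down li N out) := by unfold Spec_lay_down; infer_instance

-- ===== CLAIM (what is proved, stated in full; the proofs are below) =====
def Claim_equal_lay_down : Prop := ∀ (li : List String) (N : Int), Dom_lay_down li N → Pre_lay_down li N → Spec_lay_down li N (lay_down li N)

-- ===== LEMMAS AND PROOFS =====

-- the list of maximal dot-run lengths of a row (always nonempty; #obstacles + 1 entries)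
def runs : List Char → List Int
  | [] => [0]
  | c :: cs => if c = '.' then ((runs cs).headI + 1) :: (runs cs).tail else 0 :: runs cs

theorem runs_ne_nil (cs : List Char) : runs cs ≠ [] := by
  cases cs with
  | nil => simp [runs]
  | cons c cs => simp [runs]; split <;> simp

-- A's inner loop, flushed at the end, appends `runs` (with the incoming count added to the first run)
theorem cons_headI_tail (l : List Int) (h : l ≠ []) : l.headI :: l.tail = l := by
  cases l with
  | nil => exact absurd rfl h
  | cons a t => rfl

theorem foldA_eq_runs (cs : List Char) : ∀ (acc : List Int) (count : Int),
    (cs.foldl layStep (acc, count)).1 ++ [(cs.foldl layStep (acc, count)).2]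
      = acc ++ ((count + (runs cs).headI) :: (runs cs).tail) := by
  induction cs with
  | nil => intro acc count; simp [runs]
  | cons c cs ih =>
    intro acc count
    by_cases h : c = '.'
    · have hs : layStep (acc, count) c = (acc, count + 1) := by simp [layStep, h]
      rw [List.foldl_cons, hs, ih]
      simp only [runs, if_pos h, List.headI_cons, List.tail_cons]
      congr 2
      ring
    · have hs : layStep (acc, count) c = (acc ++ [count], 0) := by simp [layStep, h]
      rw [List.foldl_cons, hs, ih]
      simp only [runs, if_neg h, List.headI_cons, List.tail_cons, zero_add,
        List.append_assoc, List.cons_append, List.nil_append]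
      rw [cons_headI_tail _ (runs_ne_nil cs), add_zero]

-- obstacle indices of a row, counting from k
def obsIdx (k : Int) : List Char → List Int
  | [] => []
  | c :: cs => if c = '.' then obsIdx (k + 1) cs else k :: obsIdx (k + 1) cs

theorem enumerate_filter_eq_obsIdx (cs : List Char) : ∀ (s : Int),
    ((PySem.List.enumerate cs s).filter (fun p => p.2 != '.')).map (·.1) = obsIdx s cs := by
  induction cs with
  | nil => intro s; simp [PySem.List.enumerate_nil, obsIdx]
  | cons c cs ih =>
    intro s
    rw [PySem.List.enumerate_cons]
    by_cases h : c = '.'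
    · simp [obsIdx, h, ih]
    · simp [obsIdx, h, ih]

def gapsOf (l : List Int) : List Int := (l.zip l.tail).map (fun p => p.2 - p.1 - 1)

theorem gapsOf_cons (a : Int) (t : List Int) (h : t ≠ []) :
    gapsOf (a :: t) = (t.headI - a - 1) :: gapsOf t := by
  cases t with
  | nil => exact absurd rfl h
  | cons b t' => simp [gapsOf]

theorem gaps_eq_runs (cs : List Char) : ∀ (k : Int),
    gapsOf ((k - 1) :: (obsIdx k cs ++ [k + (cs.length : Int)])) = runs cs := by
  induction cs with
  | nil => intro k; simp [obsIdx, gapsOf, runs]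
  | cons c cs ih =>
    intro k
    have base := ih (k + 1)
    rw [show (k + 1 : Int) - 1 = k by ring] at base
    have hlen : k + ((c :: cs).length : Int) = k + 1 + (cs.length : Int) := by
      simp; omega
    by_cases h : c = '.'
    · have ht : obsIdx (k + 1) cs ++ [k + 1 + (cs.length : Int)] ≠ [] := by simp
      rw [gapsOf_cons _ _ ht] at base
      simp only [obsIdx, if_pos h, runs, if_pos h, hlen]
      rw [gapsOf_cons _ _ ht, ← base]
      simp only [List.headI_cons, List.tail_cons]
      congr 1
      ring
    · simp only [obsIdx, if_neg h, runs, if_neg h, hlen, List.cons_append]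
      rw [gapsOf_cons _ _ (by simp), base]
      simp only [List.headI_cons]
      congr 1
      ring

-- A's range-indexed fold equals the structural fold over the first m characters
theorem foldRange_eq_foldTake (cs : List Char) (m : Nat) (hm : m ≤ cs.length) (init : List Int × Int) :
    (PySem.List.pyRange 0 (m : Int) 1).foldl (fun (p : List Int × Int) i =>
        match PySem.List.pyGet? cs i with
        | some c => layStep p c
        | none => p) init
      = (cs.take m).foldl layStep init := by
  induction m with
  | zero => simp [PySem.List.pyRange_zero_nat]
  | succ m ih =>
    have hm' : m ≤ cs.length := Nat.le_of_succ_le hm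
    have hlt : m < cs.length := hm
    have hsplit : PySem.List.pyRange 0 ((m + 1 : Nat) : Int) 1
        = PySem.List.pyRange 0 (m : Int) 1 ++ [(m : Int)] := by
      rw [show ((m + 1 : Nat) : Int) = (m : Int) + 1 by push_cast; ring]
      exact PySem.List.pyRange_one_succ_right (by omega)
    rw [hsplit, List.foldl_append, ih hm', List.take_succ, List.foldl_append]
    have : PySem.List.pyGet? cs ((m : Nat) : Int) = some cs[m] := by
      simp [PySem.List.pyGet?_natCast, List.getElem?_eq_getElem hlt]
    simp [this, List.getElem?_eq_getElem hlt]

-- one row of A equals one row of B (given the row is long enough, or N ≤ 0)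
theorem row_eq (item : String) (N : Int) (acc : List Int)
    (h : N ≤ 0 ∨ N ≤ (item.length : Int)) :
    (let q := (PySem.List.pyRange 0 N 1).foldl (fun (p : List Int × Int) i =>
        match PySem.Str.pyGet? item i with
        | some c => layStep p c
        | none => p) (acc, 0)
     q.1 ++ [q.2])
      = (let seg := PySem.List.slice item.toList none (some (max N 0))
         let obs := ((PySem.List.enumerate seg 0).filter (fun p => p.2 != '.')).map (·.1)
         let bounds := (-1 : Int) :: obs ++ [(seg.length : Int)]
         acc ++ (bounds.zip bounds.tail).map (fun p => p.2 - p.1 - 1)) := by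
  have hseg : PySem.List.slice item.toList none (some (max N 0)) = item.toList.take (max N 0).toNat :=
    PySem.List.slice_to _ (le_max_right N 0)
  have hget : ∀ (p : List Int × Int) (i : Int),
      (match PySem.Str.pyGet? item i with
       | some c => layStep p c
       | none => p)
      = (match PySem.List.pyGet? item.toList i with
         | some c => layStep p c
         | none => p) := by
    intro p i; simp [PySem.Str.pyGet?_eq]
  simp only [hseg, hget]
  set cs := item.toList with hcs
  have hm : (max N 0).toNat ≤ cs.length ∨ N ≤ 0 := by
    rcases h with h | h
    · right; exact h
    · left
      have : (item.length : Int) = (cs.length : Int) := by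
        simp [hcs, PySem.Str.len_eq]
      omega
  have hrange : PySem.List.pyRange 0 N 1 = PySem.List.pyRange 0 ((max N 0).toNat : Int) 1 := by
    by_cases h0 : N ≤ 0
    · rw [PySem.List.pyRange_one_eq_nil (by omega), PySem.List.pyRange_one_eq_nil (by omega)]
    · congr 1; omega
  rcases hm with hm | hN
  · rw [hrange, foldRange_eq_foldTake cs _ hm, foldA_eq_runs,
      enumerate_filter_eq_obsIdx]
    show _ = acc ++ gapsOf ((-1 : Int) :: obsIdx 0 (cs.take (max N 0).toNat) ++ [((cs.take (max N 0).toNat).length : Int)])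
    simp only [List.cons_append]
    have hg := gaps_eq_runs (cs.take (max N 0).toNat) 0
    rw [zero_add] at hg
    rw [show (-1 : Int) = 0 - 1 by ring, hg, zero_add,
      cons_headI_tail _ (runs_ne_nil _)]
  · -- N ≤ 0: empty range on the left, empty segment on the right
    have hmax : (max N 0).toNat = 0 := by omega
    rw [hrange, hmax]
    simp [PySem.List.pyRange_zero_nat, PySem.List.enumerate_nil, obsIdx, gapsOf]

theorem lay_down_spec : Claim_equal_lay_down := by
  intro li N _ hpre
  show lay_down li N = lay_down_alt li N
  unfold lay_down lay_down_alt
  have : ∀ (l : List String), (∀ s ∈ l, s ∈ li) → ∀ (acc : List Int),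
      l.foldl (fun count_li item =>
        let q := (PySem.List.pyRange 0 N 1).foldl (fun (p : List Int × Int) i =>
          match PySem.Str.pyGet? item i with
          | some c => layStep p c
          | none => p) (count_li, 0)
        q.1 ++ [q.2]) acc
      = l.foldl (fun count_li item =>
        let seg := PySem.List.slice item.toList none (some (max N 0))
        let obs := ((PySem.List.enumerate seg 0).filter (fun p => p.2 != '.')).map (·.1)
        let bounds := (-1 : Int) :: obs ++ [(seg.length : Int)]
        count_li ++ (bounds.zip bounds.tail).map (fun p => p.2 - p.1 - 1)) acc := by
    intro l
    induction l with
    | nil => intro _ acc; rfl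
    | cons x xs ih =>
      intro hsub acc
      have hx : N ≤ 0 ∨ N ≤ (x.length : Int) := by
        rcases hpre with h | h
        · left; exact h
        · right; exact h x (hsub x (List.mem_cons_self))
      simp only [List.foldl_cons]
      rw [row_eq x N acc hx]
      exact ih (fun s hs => hsub s (List.mem_cons_of_mem _ hs)) _
  exact this li (fun _ hs => hs) []
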